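-- pv_equiv track=rewrite | github.com/irfan-sec/InvestiGUI | logs/linux.py | _detect_log_type
-- ===== SOURCE A (Python) =====
-- def _detect_log_type(log_path):
--     """Detect log type from file path."""
--     path_lower = log_path.lower()
--
--     if 'auth' in path_lower:
--         return 'auth'
--     elif 'apache' in path_lower or 'httpd' in path_lower:
--         return 'apache'
--     elif 'nginx' in path_lower:
--         return 'nginx'
--     elif 'kernel' in path_lower or 'dmesg' in path_lower:
--         return 'kernel'
--     elif any(x in path_lower for x in ['syslog', 'messages', 'system']):
--         return 'syslog'
--     else:
--         return 'syslog'  # Default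
-- ===== SOURCE B (Python) =====
-- # Multi-pattern position scan: walk the lowered path once, collecting every
-- # label whose keyword starts at some position, then resolve by fixed priority.
-- _KEYWORD_LABELS = (
--     ('auth', 'auth'),
--     ('apache', 'apache'),
--     ('httpd', 'apache'),
--     ('nginx', 'nginx'),
--     ('kernel', 'kernel'),
--     ('dmesg', 'kernel'),
-- )
--
-- _PRIORITY = ('auth', 'apache', 'nginx', 'kernel')
--
--
-- def _detect_log_type(log_path):
--     """Detect log type from file path."""
--     p = log_path.lower()
--     found = {label
--              for i in range(len(p))
--              for kw, label in _KEYWORD_LABELS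
--              if p.startswith(kw, i)}
--     for label in _PRIORITY:
--         if label in found:
--             return label
--     return 'syslog'
-- ===== Notes on version B (the rewrite author's own statement) =====
-- stated objective: alternative
-- what changed: Instead of an if/elif chain of substring tests, B does one multi-pattern scan over every position of the lowered path, collecting the set of all labels whose keyword starts there, and then resolves that set against a fixed priority order (the syslog keywords disappear entirely since syslog is also the default).
import Mathlib
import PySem

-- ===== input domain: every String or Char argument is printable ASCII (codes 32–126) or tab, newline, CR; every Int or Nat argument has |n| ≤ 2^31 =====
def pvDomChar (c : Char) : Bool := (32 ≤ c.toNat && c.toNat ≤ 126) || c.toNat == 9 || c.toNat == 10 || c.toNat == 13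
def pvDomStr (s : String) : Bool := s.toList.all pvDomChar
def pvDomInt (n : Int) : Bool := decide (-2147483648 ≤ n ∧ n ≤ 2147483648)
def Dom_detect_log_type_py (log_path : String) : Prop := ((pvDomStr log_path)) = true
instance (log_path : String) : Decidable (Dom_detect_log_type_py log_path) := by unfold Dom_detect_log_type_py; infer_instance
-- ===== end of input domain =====

-- B replaces the if/elif substring chain by a multi-pattern position scan collecting the set
-- of matched labels, then a priority pass over that set (objective: alternative algorithm).

-- ===== PORT A =====
def detect_log_type_py (log_path : String) : String :=
  let path_lower := PySem.Str.lower log_path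
  if PySem.Str.isIn "auth" path_lower then "auth"
  else if PySem.Str.isIn "apache" path_lower || PySem.Str.isIn "httpd" path_lower then "apache"
  else if PySem.Str.isIn "nginx" path_lower then "nginx"
  else if PySem.Str.isIn "kernel" path_lower || PySem.Str.isIn "dmesg" path_lower then "kernel"
  else if ["syslog", "messages", "system"].any (fun x => PySem.Str.isIn x path_lower) then "syslog"
  else "syslog"

-- ===== PORT B =====
def pvKeywordLabels : List (String × String) :=
  [("auth", "auth"), ("apache", "apache"), ("httpd", "apache"),
   ("nginx", "nginx"), ("kernel", "kernel"), ("dmesg", "kernel")]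

def pvPriority : List String := ["auth", "apache", "nginx", "kernel"]

-- p.startswith(kw, i) for 0 ≤ i is exactly: kw is a prefix of p[i:] (ported by hand, exact here).
def pvFound (p : List Char) : PySem.Set String :=
  PySem.Set.ofList ((List.range p.length).flatMap (fun i =>
    (pvKeywordLabels.filter (fun kv => PySem.Chars.startswith (p.drop i) kv.1.toList)).map (·.2)))

def pvPick (found : PySem.Set String) : List String → String
  | [] => "syslog"
  | l :: rest => if PySem.Set.contains found l then l else pvPick found rest

def detect_log_type_py_alt (log_path : String) : String :=
  let p := (PySem.Str.lower log_path).toList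
  pvPick (pvFound p) pvPriority

-- ===== PRECONDITION & SPEC =====
def Spec_detect_log_type_py (log_path : String) (out : String) : Prop := out = detect_log_type_py_alt log_path
instance (log_path : String) (out : String) : Decidable (Spec_detect_log_type_py log_path out) := by unfold Spec_detect_log_type_py; infer_instance

-- ===== CLAIM (what is proved, stated in full; the proofs are below) =====
def Claim_equal_detect_log_type_py : Prop := ∀ (log_path : String), Dom_detect_log_type_py log_path → Spec_detect_log_type_py log_path (detect_log_type_py log_path)

-- ===== LEMMAS AND PROOFS =====

-- A nonempty keyword occurs as a prefix at some position below the length iff it is a substring.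
theorem pv_exists_drop_iff (p kw : List Char) (hkw : kw ≠ []) :
    (∃ i, i < p.length ∧ kw <+: p.drop i) ↔ PySem.Chars.isIn kw p = true := by
  rw [← PySem.Chars.exists_prefix_drop_iff_isIn]
  constructor
  · rintro ⟨i, _, h⟩; exact ⟨i, h⟩
  · rintro ⟨j, h⟩
    by_cases hj : j < p.length
    · exact ⟨j, hj, h⟩
    · exfalso
      rw [List.drop_eq_nil_of_le (le_of_not_gt hj), List.prefix_nil] at h
      exact hkw h

theorem pv_mem_found (p : List Char) (s : String) :
    s ∈ pvFound p ↔ ∃ kv ∈ pvKeywordLabels, kv.2 = s ∧ PySem.Chars.isIn kv.1.toList p = true := by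
  unfold pvFound
  rw [PySem.Set.mem_ofList]
  simp only [List.mem_flatMap, List.mem_map, List.mem_filter, List.mem_range]
  constructor
  · rintro ⟨i, hi, kv, ⟨hmem, hsw⟩, hlab⟩
    refine ⟨kv, hmem, hlab, ?_⟩
    have : kv.1.toList ≠ [] := by
      fin_cases hmem <;> simp
    exact (pv_exists_drop_iff p kv.1.toList this).mp
      ⟨i, hi, (PySem.Chars.startswith_iff _ _).mp hsw⟩
  · rintro ⟨kv, hmem, hlab, hin⟩
    have hne : kv.1.toList ≠ [] := by
      fin_cases hmem <;> simp
    obtain ⟨i, hi, hpre⟩ := (pv_exists_drop_iff p kv.1.toList hne).mpr hin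
    exact ⟨i, hi, kv, ⟨hmem, (PySem.Chars.startswith_iff _ _).mpr hpre⟩, hlab⟩

theorem pv_contains_found (p : List Char) (s : String) :
    PySem.Set.contains (pvFound p) s =
      (pvKeywordLabels.filter (fun kv => kv.2 == s)).any (fun kv => PySem.Chars.isIn kv.1.toList p) := by
  by_cases h : s ∈ pvFound p
  · have := (pv_mem_found p s).mp h
    obtain ⟨kv, hmem, hlab, hin⟩ := this
    have h1 : PySem.Set.contains (pvFound p) s = true := (PySem.Set.contains_iff _ _).mpr h
    rw [h1]
    symm
    rw [List.any_eq_true]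
    exact ⟨kv, List.mem_filter.mpr ⟨hmem, by simp [hlab]⟩, hin⟩
  · have h1 : PySem.Set.contains (pvFound p) s = false := by
      rw [Bool.eq_false_iff]
      intro hc; exact h ((PySem.Set.contains_iff _ _).mp hc)
    rw [h1]
    symm
    rw [Bool.eq_false_iff]
    intro hc
    rw [List.any_eq_true] at hc
    obtain ⟨kv, hmem, hin⟩ := hc
    rw [List.mem_filter] at hmem
    exact h ((pv_mem_found p s).mpr ⟨kv, hmem.1, by simpa using hmem.2, hin⟩)

-- ===== VERDICT (by name: the statement is the Claim_ definition above) =====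
theorem detect_log_type_py_spec : Claim_equal_detect_log_type_py := by
  intro log_path _
  unfold Spec_detect_log_type_py detect_log_type_py detect_log_type_py_alt
  simp only [pvPriority, pvPick]
  rw [pv_contains_found, pv_contains_found, pv_contains_found, pv_contains_found]
  simp only [pvKeywordLabels, List.filter, List.any, PySem.Str.isIn_eq]
  simp only [show (("auth" : String) == "auth") = true from rfl]
  norm_num
  split_ifs <;> simp_all
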